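-- pv_equiv track=rewrite | github.com/Duycan17/CFG-Parser | app/services/graph_converter.py | _tokenize_code
-- ===== SOURCE A (Python) =====
-- def _tokenize_code(code: str) -> list[str]:
--     """Tokenize code snippet into tokens.
--
--     Simple tokenization for transformer input.
--     """
--     if not code:
--         return []
--
--     # Clean and split code
--     code = code.strip()
--
--     # Simple tokenization: split on whitespace and special characters
--     tokens: list[str] = []
--     current = ""
--
--     special_chars = set("(){}[];,.<>=+-*/%&|!?:")
--
--     for char in code:
--         if char.isspace():
--             if current:
--                 tokens.append(current)
--                 current = ""
--         elif char in special_chars: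
--             if current:
--                 tokens.append(current)
--                 current = ""
--             tokens.append(char)
--         else:
--             current += char
--
--     if current:
--         tokens.append(current)
--
--     # Limit tokens for very long code
--     max_tokens = 50
--     if len(tokens) > max_tokens:
--         tokens = tokens[:max_tokens] + ["..."]
--
--     return tokens
-- ===== SOURCE B (Python) =====
-- def _tokenize_code(code: str) -> list[str]:
--     """Tokenize code snippet into tokens (pad specials with spaces, then split)."""
--     if not code:
--         return []
--
--     special_chars = "(){}[];,.<>=+-*/%&|!?:"
--
--     padded = "".join(
--         f" {ch} " if ch in special_chars else ch for ch in code.strip()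
--     )
--     tokens = padded.split()
--
--     max_tokens = 50
--     if len(tokens) > max_tokens:
--         tokens = tokens[:max_tokens] + ["..."]
--
--     return tokens
-- ===== Notes on version B (the rewrite author's own statement) =====
-- stated objective: simpler
-- what changed: B drops A's character loop with its `current` accumulator and delimiter flushes: it pads every special character with spaces in one join and then tokenizes with a single str.split().
import Mathlib
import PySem

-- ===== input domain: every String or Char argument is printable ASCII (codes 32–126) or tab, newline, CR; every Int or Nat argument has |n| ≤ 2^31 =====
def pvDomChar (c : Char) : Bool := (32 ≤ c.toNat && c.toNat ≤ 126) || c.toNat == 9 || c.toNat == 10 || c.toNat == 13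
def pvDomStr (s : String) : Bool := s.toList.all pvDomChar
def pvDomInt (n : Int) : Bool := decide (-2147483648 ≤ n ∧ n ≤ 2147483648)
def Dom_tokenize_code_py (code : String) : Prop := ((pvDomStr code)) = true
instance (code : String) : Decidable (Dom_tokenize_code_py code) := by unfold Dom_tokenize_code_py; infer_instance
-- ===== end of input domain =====

-- B replaces A's character loop with its `current` accumulator by padding each special
-- character with spaces and splitting once on whitespace (objective: simpler).

-- ===== PORT A =====
def pvSpecialsA : List Char := "(){}[];,.<>=+-*/%&|!?:".toList

-- the for-loop over `code`, state = (tokens, current)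
def tokALoop : List Char → List String → List Char → List String × List Char
  | [], tokens, current => (tokens, current)
  | c :: rest, tokens, current =>
    if PySem.Chars.isspace c then
      if current ≠ [] then tokALoop rest (tokens ++ [String.ofList current]) []
      else tokALoop rest tokens current
    else if c ∈ pvSpecialsA then
      tokALoop rest
        ((if current ≠ [] then tokens ++ [String.ofList current] else tokens)
          ++ [String.ofList [c]]) []
    else tokALoop rest tokens (current ++ [c])

def tokenize_code_py (code : String) : List String :=
  if code = "" then []
  else
    let code := PySem.Str.strip code
    let st := tokALoop code.toList [] []
    let tokens := if st.2 ≠ [] then st.1 ++ [String.ofList st.2] else st.1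
    if tokens.length > 50 then tokens.take 50 ++ ["..."] else tokens

-- ===== PORT B =====
def pvSpecialsB : List Char := "(){}[];,.<>=+-*/%&|!?:".toList

def tokenize_code_py_alt (code : String) : List String :=
  if code = "" then []
  else
    let padded := PySem.Str.join ""
      ((PySem.Str.strip code).toList.map (fun c =>
        if c ∈ pvSpecialsB then String.ofList [' ', c, ' '] else String.ofList [c]))
    let tokens := PySem.Str.split₀ padded
    if tokens.length > 50 then tokens.take 50 ++ ["..."] else tokens

-- ===== PRECONDITION & SPEC =====
def Spec_tokenize_code_py (code : String) (out : List String) : Prop := out = tokenize_code_py_alt code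
instance (code : String) (out : List String) : Decidable (Spec_tokenize_code_py code out) := by unfold Spec_tokenize_code_py; infer_instance

-- ===== CLAIM (what is proved, stated in full; the proofs are below) =====
def Claim_equal_tokenize_code_py : Prop := ∀ (code : String), Dom_tokenize_code_py code → Spec_tokenize_code_py code (tokenize_code_py code)

-- ===== LEMMAS AND PROOFS =====

-- char-level version of A's loop, used only in the proofs
def tokCLoop : List Char → List (List Char) → List Char → List (List Char) × List Char
  | [], tokens, current => (tokens, current)
  | c :: rest, tokens, current =>
    if PySem.Chars.isspace c then
      if current ≠ [] then tokCLoop rest (tokens ++ [current]) []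
      else tokCLoop rest tokens current
    else if c ∈ pvSpecialsA then
      tokCLoop rest
        ((if current ≠ [] then tokens ++ [current] else tokens) ++ [[c]]) []
    else tokCLoop rest tokens (current ++ [c])

lemma specialsA_not_space {c : Char} (h : c ∈ pvSpecialsA) :
    PySem.Chars.isspace c = false := by
  simp [pvSpecialsA] at h
  rcases h with h|h|h|h|h|h|h|h|h|h|h|h|h|h|h|h|h|h|h|h|h|h <;> subst h <;> decide

lemma tokALoop_eq_map (cs : List Char) (tokens : List (List Char)) (current : List Char) :
    tokALoop cs (tokens.map String.ofList) current
      = ((tokCLoop cs tokens current).1.map String.ofList, (tokCLoop cs tokens current).2) := by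
  induction cs generalizing tokens current with
  | nil => simp [tokALoop, tokCLoop]
  | cons c rest ih =>
    by_cases h1 : PySem.Chars.isspace c = true
    · by_cases hc : current = []
      · subst hc
        simp only [tokALoop, tokCLoop, h1, if_true, ne_eq, not_true_eq_false, if_false]
        exact ih tokens []
      · simp only [tokALoop, tokCLoop, h1, if_true, ne_eq, hc, not_false_eq_true, if_true]
        have := ih (tokens ++ [current]) []
        simpa using this
    · by_cases h3 : c ∈ pvSpecialsA
      · by_cases hc : current = []
        · subst hc
          simp only [tokALoop, tokCLoop, h1, if_false, h3, if_true, ne_eq, not_true_eq_false]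
          have := ih (tokens ++ [[c]]) []
          simpa using this
        · simp only [tokALoop, tokCLoop, h1, h3, if_true, ne_eq, hc,
            not_false_eq_true]
          have := ih ((tokens ++ [current]) ++ [[c]]) []
          simpa using this
      · simp only [tokALoop, tokCLoop, h1, if_false, h3]
        exact ih tokens (current ++ [c])

def padB (c : Char) : List Char :=
  if c ∈ pvSpecialsA then [' ', c, ' '] else [c]

lemma join_empty_sep (parts : List (List Char)) :
    PySem.Chars.join [] parts = parts.flatten := by
  unfold PySem.Chars.join
  induction parts with
  | nil => simp [List.intercalate]
  | cons p ps ih =>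
    cases ps with
    | nil => simp [List.intercalate]
    | cons q qs =>
      simp only [List.intercalate, List.intersperse, List.flatten] at ih ⊢
      simpa using ih

-- main invariant: split₀.go over the padded characters simulates A's loop
lemma go_padded (cs : List Char) (current : List Char) (tokens : List (List Char)) :
    PySem.Chars.split₀.go ((cs.map padB).flatten) current.reverse tokens.reverse
      = (fun st : List (List Char) × List Char => if st.2.isEmpty then st.1 else st.1 ++ [st.2]) (tokCLoop cs tokens current) := by
  induction cs generalizing current tokens with
  | nil =>
    simp only [List.map_nil, List.flatten_nil, PySem.Chars.split₀.go, tokCLoop]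
    by_cases hc : current = []
    · subst hc; simp
    · simp [hc, List.isEmpty_iff]
  | cons c rest ih =>
    by_cases hsp : PySem.Chars.isspace c = true
    · -- c is whitespace: not special (specials are never spaces), padB c = [c]
      have hns : c ∉ pvSpecialsA := fun h => by simp [specialsA_not_space h] at hsp
      simp only [List.map_cons, List.flatten_cons, padB, if_neg hns, List.cons_append,
        List.nil_append, PySem.Chars.split₀.go, hsp, if_true]
      by_cases hc : current = []
      · subst hc
        simpa [tokCLoop, hsp] using ih [] tokens
      · have : current.reverse.isEmpty = false := by simp [hc]
        simp only [this, Bool.false_eq_true, if_false, tokCLoop, hsp, if_true, if_pos hc]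
        have := ih [] (tokens ++ [current])
        simpa using this
    · by_cases hspec : c ∈ pvSpecialsA
      · -- special: padB c = [' ', c, ' ']
        simp only [List.map_cons, List.flatten_cons, padB, if_pos hspec, List.cons_append,
          List.nil_append, PySem.Chars.split₀.go]
        have hsw : PySem.Chars.isspace ' ' = true := by decide
        simp only [hsw, if_true, hsp, Bool.false_eq_true, if_false]
        by_cases hc : current = []
        · subst hc
          simp only [List.reverse_nil, List.isEmpty_nil, if_true]
          have := ih [] (tokens ++ [[c]])
          simp only [List.reverse_nil] at this
          simp only [tokCLoop, hsp, Bool.false_eq_true, if_false, hspec, if_true, ne_eq,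
            not_true_eq_false]
          simpa using this
        · have hne : current.reverse.isEmpty = false := by simp [hc]
          simp only [hne, Bool.false_eq_true, if_false]
          have := ih [] ((tokens ++ [current]) ++ [[c]])
          simp only [List.reverse_nil] at this
          simp [tokCLoop, hsp, hspec, hc]
          simpa using this
      · -- ordinary character: accumulate
        simp only [List.map_cons, List.flatten_cons, padB, if_neg hspec, List.cons_append,
          List.nil_append, PySem.Chars.split₀.go, hsp, Bool.false_eq_true, if_false]
        have := ih (current ++ [c]) tokens
        simp only [List.reverse_append, List.reverse_cons, List.reverse_nil,
          List.nil_append, List.singleton_append] at this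
        simpa [tokCLoop, hsp, hspec] using this

-- ===== VERDICT (by name: the statement is the Claim_ definition above) =====
theorem tokenize_code_py_spec : Claim_equal_tokenize_code_py := by
  intro code _
  unfold Spec_tokenize_code_py tokenize_code_py tokenize_code_py_alt
  by_cases h0 : code = ""
  · simp [h0]
  · simp only [h0, if_false]
    set cs := (PySem.Str.strip code).toList with hcs
    -- B's token list equals the char-level flush of A's loop, mapped to strings
    have hpad : (cs.map (fun c =>
        if c ∈ pvSpecialsB then String.ofList [' ', c, ' '] else String.ofList [c])).map
          String.toList = cs.map padB := by
      simp only [List.map_map]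
      refine List.map_congr_left (fun c _ => ?_)
      by_cases hc : c ∈ pvSpecialsB <;>
        simp [padB, pvSpecialsB, pvSpecialsA] at * <;> simp [hc]
    have hB : PySem.Str.split₀ (PySem.Str.join ""
        (cs.map (fun c => if c ∈ pvSpecialsB then String.ofList [' ', c, ' ']
          else String.ofList [c])))
        = ((fun st : List (List Char) × List Char => if st.2.isEmpty then st.1 else st.1 ++ [st.2])
            (tokCLoop cs [] [])).map String.ofList := by
      unfold PySem.Str.split₀ PySem.Str.join
      rw [hpad, show ("".toList : List Char) = [] from rfl, join_empty_sep]
      have hgo := go_padded cs [] []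
      simp only [List.reverse_nil] at hgo
      simp only [PySem.Chars.split₀]
      rw [show (String.ofList ((cs.map padB).flatten)).toList = (cs.map padB).flatten by simp]
      rw [hgo]
    have hA : tokALoop cs [] []
        = (((tokCLoop cs [] []).1).map String.ofList, (tokCLoop cs [] []).2) := by
      simpa using tokALoop_eq_map cs [] []
    rw [hB, hA]
    rcases hst : tokCLoop cs [] [] with ⟨t, cur⟩
    by_cases hc : cur = []
    · simp [hc]
    · simp [hc, List.isEmpty_iff]
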